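-- pv_equiv track=rewrite | github.com/jake-47/general-kb | link_checker.py | group_results_by_file
-- ===== SOURCE A (Python) =====
-- def group_results_by_file(all_results):
--     """Group results by file for better reporting."""
--     grouped = {}
--
--     for file_path, results in all_results:
--         # Skip files with no broken links
--         has_broken = any(not is_valid for is_valid, _, _, _, _ in results)
--         if has_broken:
--             if file_path not in grouped:
--                 grouped[file_path] = []
--
--             for is_valid, link_text, url, position, reason in results:
--                 if not is_valid:
--                     grouped[file_path].append((position, link_text, url, reason))
--
--     # Sort results by file name
--     return {k: sorted(v, key=lambda x: x[0]) for k, v in sorted(grouped.items())}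
-- ===== SOURCE B (Python) =====
-- def group_results_by_file(all_results):
--     """Group results by file for better reporting."""
--     def broken_in(results):
--         return [(position, link_text, url, reason)
--                 for is_valid, link_text, url, position, reason in results
--                 if not is_valid]
--     files = sorted({fp for fp, results in all_results if broken_in(results)})
--     return {fp: sorted((t for f, results in all_results if f == fp
--                         for t in broken_in(results)), key=lambda x: x[0])
--             for fp in files}
-- ===== Notes on version B (the rewrite author's own statement) =====
-- stated objective: alternative
-- what changed: B drops A's mutable dict accumulation (membership pre-check, key-ensuring insert, per-item appends) and instead computes the sorted set of files that have a broken link, then builds each file's bucket declaratively by re-scanning the input and collecting that file's broken tuples, sorted by position.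
import Mathlib
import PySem

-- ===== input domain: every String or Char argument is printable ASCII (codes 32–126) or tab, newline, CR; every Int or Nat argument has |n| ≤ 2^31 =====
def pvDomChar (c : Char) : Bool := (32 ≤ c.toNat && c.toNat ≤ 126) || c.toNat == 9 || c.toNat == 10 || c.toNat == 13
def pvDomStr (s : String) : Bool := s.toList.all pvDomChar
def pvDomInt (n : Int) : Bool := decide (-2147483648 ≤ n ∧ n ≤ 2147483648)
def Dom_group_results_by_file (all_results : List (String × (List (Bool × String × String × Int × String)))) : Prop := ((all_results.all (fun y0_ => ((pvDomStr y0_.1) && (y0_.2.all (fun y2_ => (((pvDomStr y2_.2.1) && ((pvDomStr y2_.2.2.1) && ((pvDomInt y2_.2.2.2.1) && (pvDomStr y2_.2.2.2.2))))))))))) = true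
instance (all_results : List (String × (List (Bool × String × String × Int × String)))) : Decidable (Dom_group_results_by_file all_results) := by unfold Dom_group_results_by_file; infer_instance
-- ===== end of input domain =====

-- B replaces A's mutable dict accumulation by a declarative two-phase computation
-- (sorted set of files with broken links, then a per-file re-scan); same return value, no speed claim.


-- ===== PORT A =====
-- one iteration of A's outer loop body (a tuple r is (is_valid, link_text, url, position, reason))
def pvAStep (d : PySem.Dict String (List (Int × String × String × String)))
    (p : String × List (Bool × String × String × Int × String)) :
    PySem.Dict String (List (Int × String × String × String)) :=
  if p.2.any (fun r => !r.1) then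
    let d1 := if d.contains p.1 then d else d.insert p.1 []
    p.2.foldl (fun d r =>
      if !r.1 then d.modify p.1 [] (fun v => v ++ [(r.2.2.2.1, r.2.1, r.2.2.1, r.2.2.2.2)]) else d) d1
  else d

-- Python's sorted(grouped.items()) compares the (k, v) tuples; dict keys are distinct,
-- so the comparison is decided by k alone — sorting by the key is exact here
def group_results_by_file (all_results : List (String × (List (Bool × String × String × Int × String)))) : List (String × List (Int × String × String × String)) :=
  (PySem.List.sorted (all_results.foldl pvAStep PySem.Dict.empty).items (fun kv => kv.1) false).map
    (fun kv => (kv.1, PySem.List.sorted kv.2 (fun x => x.1) false))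

-- ===== PORT B =====
-- broken_in(results): the (position, link_text, url, reason) tuples of the invalid links
def pvBrokenIn (results : List (Bool × String × String × Int × String)) : List (Int × String × String × String) :=
  (results.filter (fun r => !r.1)).map (fun r => (r.2.2.2.1, r.2.1, r.2.2.1, r.2.2.2.2))

-- sorted({fp for fp, results in all_results if broken_in(results)}): a set consumed by a
-- key-less sorted over distinct strings — independent of Python's set iteration order
def group_results_by_file_alt (all_results : List (String × (List (Bool × String × String × Int × String)))) : List (String × List (Int × String × String × String)) :=
  (PySem.List.sorted
    (PySem.Set.ofList ((all_results.filter (fun p => !(pvBrokenIn p.2).isEmpty)).map (fun p => p.1)))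
    (fun k => k) false).map (fun fp =>
    (fp, PySem.List.sorted
          (all_results.flatMap (fun p => if p.1 = fp then pvBrokenIn p.2 else []))
          (fun x => x.1) false))

-- ===== PRECONDITION & SPEC =====
def Spec_group_results_by_file (all_results : List (String × (List (Bool × String × String × Int × String)))) (out : List (String × List (Int × String × String × String))) : Prop := out = group_results_by_file_alt all_results
instance (all_results : List (String × (List (Bool × String × String × Int × String)))) (out : List (String × List (Int × String × String × String))) : Decidable (Spec_group_results_by_file all_results out) := by unfold Spec_group_results_by_file; infer_instance

-- ===== CLAIM (what is proved, stated in full; the proofs are below) =====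
def Claim_equal_group_results_by_file : Prop := ∀ (all_results : List (String × (List (Bool × String × String × Int × String)))), Dom_group_results_by_file all_results → Spec_group_results_by_file all_results (group_results_by_file all_results)

-- ===== LEMMAS AND PROOFS =====

-- a results list has no broken entry iff broken_in gives []
lemma pvBrokenIn_eq_nil_iff (rs : List (Bool × String × String × Int × String)) :
    pvBrokenIn rs = [] ↔ rs.any (fun r => !r.1) = false := by
  simp [pvBrokenIn, List.filter_eq_nil_iff, List.any_eq_false]

-- A's inner loop: only the bucket of key k grows, by exactly broken_in rs
lemma innerA_getD (rs : List (Bool × String × String × Int × String)) (k fp : String)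
    (d : PySem.Dict String (List (Int × String × String × String))) :
    (rs.foldl (fun d r =>
      if !r.1 then d.modify k [] (fun v => v ++ [(r.2.2.2.1, r.2.1, r.2.2.1, r.2.2.2.2)]) else d) d).getD fp []
    = d.getD fp [] ++ (if k = fp then pvBrokenIn rs else []) := by
  induction rs generalizing d with
  | nil => simp [pvBrokenIn]
  | cons r rs ih =>
    rw [List.foldl_cons]
    by_cases hv : (!r.1) = true
    · rw [if_pos hv, ih]
      by_cases hk : k = fp
      · subst hk
        rw [if_pos rfl, if_pos rfl, PySem.Dict.getD_modify_self]
        simp [pvBrokenIn, hv, List.append_assoc]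
      · rw [if_neg hk, if_neg hk, PySem.Dict.getD_modify,
          if_neg (fun h => hk h.symm)]
    · rw [if_neg hv, ih]
      have hv' : r.1 = true := by simpa using hv
      simp [pvBrokenIn, hv']

-- A's inner loop does not change the key list (the key is already present)
lemma innerA_keys (rs : List (Bool × String × String × Int × String)) (k : String)
    (d : PySem.Dict String (List (Int × String × String × String)))
    (hc : d.contains k = true) :
    (rs.foldl (fun d r =>
      if !r.1 then d.modify k [] (fun v => v ++ [(r.2.2.2.1, r.2.1, r.2.2.1, r.2.2.2.2)]) else d) d).keys
    = d.keys := by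
  induction rs generalizing d with
  | nil => rfl
  | cons r rs ih =>
    rw [List.foldl_cons]
    by_cases hv : (!r.1) = true
    · rw [if_pos hv, ih _ (by rw [PySem.Dict.contains_modify]; simp [hc]),
        PySem.Dict.keys_modify, PySem.Dict.keys_insert_of_contains _ _ hc]
    · rw [if_neg hv, ih _ hc]

-- one outer step: the bucket of fp grows by p's broken tuples iff p is fp's row
lemma stepA_getD (d : PySem.Dict String (List (Int × String × String × String)))
    (p : String × List (Bool × String × String × Int × String)) (fp : String) :
    (pvAStep d p).getD fp [] = d.getD fp [] ++ (if p.1 = fp then pvBrokenIn p.2 else []) := by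
  unfold pvAStep
  by_cases hb : p.2.any (fun r => !r.1) = true
  · rw [if_pos hb, innerA_getD]
    by_cases hc : d.contains p.1 = true
    · rw [if_pos hc]
    · rw [if_neg hc]
      by_cases hk : p.1 = fp
      · subst hk
        rw [PySem.Dict.getD_insert_self,
          PySem.Dict.getD_of_not_contains _ _ (by simpa using hc)]
      · rw [PySem.Dict.getD_insert_of_ne _ _ _ (fun h => hk h.symm)]
  · rw [if_neg hb]
    have : pvBrokenIn p.2 = [] := (pvBrokenIn_eq_nil_iff p.2).mpr (by simpa using hb)
    simp [this]

-- one outer step: the key list gains p.1 iff p has a broken link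
lemma stepA_keys (d : PySem.Dict String (List (Int × String × String × String)))
    (p : String × List (Bool × String × String × Int × String)) :
    (pvAStep d p).keys =
      if p.2.any (fun r => !r.1) then PySem.Set.add d.keys p.1 else d.keys := by
  unfold pvAStep
  by_cases hb : p.2.any (fun r => !r.1) = true
  · rw [if_pos hb, if_pos hb]
    by_cases hc : d.contains p.1 = true
    · rw [if_pos hc, innerA_keys _ _ _ hc,
        PySem.Set.add_of_mem ((PySem.Dict.contains_iff_mem_keys _ _).mp hc)]
    · rw [if_neg hc, innerA_keys _ _ _ (PySem.Dict.contains_insert_self _ _ _),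
        PySem.Dict.keys_insert_of_not_contains _ _ (by simpa using hc),
        PySem.Set.add_of_not_mem
          (fun h => hc ((PySem.Dict.contains_iff_mem_keys _ _).mpr h))]
  · rw [if_neg hb, if_neg hb]

-- A's whole grouping loop, bucket view
lemma foldA_getD (l : List (String × List (Bool × String × String × Int × String)))
    (d : PySem.Dict String (List (Int × String × String × String))) (fp : String) :
    (l.foldl pvAStep d).getD fp []
    = d.getD fp [] ++ l.flatMap (fun p => if p.1 = fp then pvBrokenIn p.2 else []) := by
  induction l generalizing d with
  | nil => simp
  | cons p l ih => simp [ih, stepA_getD, List.append_assoc]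

-- A's whole grouping loop, key view
lemma foldA_keys (l : List (String × List (Bool × String × String × Int × String)))
    (d : PySem.Dict String (List (Int × String × String × String))) :
    (l.foldl pvAStep d).keys
    = PySem.Set.update d.keys ((l.filter (fun p => p.2.any (fun r => !r.1))).map (fun p => p.1)) := by
  induction l generalizing d with
  | nil => rfl
  | cons p l ih =>
    simp only [List.foldl_cons, List.filter_cons]
    by_cases hb : p.2.any (fun r => !r.1) = true
    · rw [ih, stepA_keys, if_pos hb, if_pos hb, List.map_cons, PySem.Set.update_cons]
    · rw [ih, stepA_keys, if_neg hb, if_neg hb]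

-- stably sorting (k, g k) pairs of distinct keys by the key = sorting the keys then pairing
lemma sorted_fst_map_pair {β : Type} (keys : List String) (hnd : keys.Nodup) (g : String → β) :
    PySem.List.sorted (keys.map (fun k => (k, g k))) (fun p => p.1) false
    = (PySem.List.sorted keys (fun k => k) false).map (fun k => (k, g k)) := by
  apply PySem.List.sorted_eq_of_perm_of_pairwise_lt
  · exact (PySem.List.sorted_perm keys (fun k => k) false).map _
  · have hnd' : (PySem.List.sorted keys (fun k => k) false).Nodup :=
      ((PySem.List.sorted_perm keys (fun k => k) false).nodup_iff).mpr hnd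
    have hle := PySem.List.sorted_pairwise (xs := keys) (key := fun k => k)
    rw [List.pairwise_map]
    exact (hle.and hnd').imp (fun h => lt_of_le_of_ne h.1 h.2)

-- ===== VERDICT (by name: the statement is the Claim_ definition above) =====
theorem group_results_by_file_spec : Claim_equal_group_results_by_file := by
  intro all_results _
  unfold Spec_group_results_by_file group_results_by_file group_results_by_file_alt
  have hpred : ∀ p : String × List (Bool × String × String × Int × String),
      (p.2.any (fun r => !r.1)) = !(pvBrokenIn p.2).isEmpty := by
    intro p
    by_cases hb : p.2.any (fun r => !r.1) = true
    · rw [hb]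
      have : pvBrokenIn p.2 ≠ [] := fun h => by
        rw [(pvBrokenIn_eq_nil_iff p.2).mp h] at hb; exact Bool.false_ne_true hb
      simp [List.isEmpty_eq_false_iff, this]
    · have hb' : p.2.any (fun r => !r.1) = false := by simpa using hb
      rw [hb', (pvBrokenIn_eq_nil_iff p.2).mpr hb']
      simp
  -- the key lists agree
  have hkeys : (all_results.foldl pvAStep PySem.Dict.empty).keys
      = PySem.Set.ofList ((all_results.filter (fun p => !(pvBrokenIn p.2).isEmpty)).map (fun p => p.1)) := by
    rw [foldA_keys, PySem.Dict.keys_empty, PySem.Set.update_nil_left,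
      List.filter_congr (fun p _ => hpred p)]
  have hnd : (all_results.foldl pvAStep PySem.Dict.empty).keys.Nodup := by
    rw [hkeys]; exact PySem.Set.nodup_ofList _
  -- items as keys paired with buckets
  rw [PySem.Dict.items_eq_map_keys _ hnd []]
  rw [sorted_fst_map_pair _ hnd]
  rw [hkeys, List.map_map]
  apply List.map_congr_left
  intro fp _
  simp only [Function.comp]
  rw [foldA_getD, PySem.Dict.getD_empty, List.nil_append]
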